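-- pv_equiv track=rewrite | github.com/ilithiofobik/jftt-compiler | parser.py | generateNumber
-- ===== SOURCE A (Python) =====
-- def generateNumber(num):
--     little_magic_number = 7
--     big_magic_number = 256
--     inc_dec = "INC a\n"
--
--     if num < 0:
--         num = -num
--         inc_dec = "DEC a\n"
--
--     if num <= little_magic_number:
--         lines = "RESET a\n" + num * inc_dec
--         return lines
--
--     # 2^n in log(log(n)) time
--     if num >= big_magic_number and num & (num - 1) == 0:
--         log_num = 0
--
--         while num >= 2:
--             log_num += 1
--             num = num // 2
--
--         lines = ""
--
--         while log_num > 0: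
--             if log_num % 2 == 0:
--                 log_num = log_num // 2
--                 lines = "SHIFT c\n" + lines
--             else:
--                 log_num = log_num - 1
--                 lines = "INC a\n" + lines
--
--         return "RESET a\n" + "RESET c\n" + "INC c\n" + lines + "SWAP c\n" + "RESET a\n" + inc_dec + "SHIFT c\n"
--
--     lines = ""
--     while num > 0:
--         if num % 2 == 0:
--             num = num // 2
--             lines = "SHIFT c\n" + lines
--         else:
--             num = num - 1
--             lines = inc_dec + lines
--     return "RESET a\n" + "RESET c\n" + "INC c\n" + lines
-- ===== SOURCE B (Python) =====
-- def generateNumber(num):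
--     little_magic_number = 7
--     big_magic_number = 256
--     inc_dec = "INC a\n"
--
--     if num < 0:
--         num = -num
--         inc_dec = "DEC a\n"
--
--     if num <= little_magic_number:
--         return "RESET a\n" + num * inc_dec
--
--     if num >= big_magic_number and num & (num - 1) == 0:
--         # synthesize log2(num) into a, then shift 1 left by it
--         return ("RESET a\n" + "RESET c\n" + "INC c\n"
--                 + _forward(num.bit_length() - 1, "INC a\n")
--                 + "SWAP c\n" + "RESET a\n" + inc_dec + "SHIFT c\n")
--
--     return "RESET a\n" + "RESET c\n" + "INC c\n" + _forward(num, inc_dec)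
--
--
-- def _forward(n, inc):
--     # precompute the bits (LSB first), then one forward MSB->LSB emit pass
--     bits = []
--     while n > 0:
--         bits.append(n % 2 == 1)
--         n //= 2
--     bits.reverse()
--     if not bits:
--         return ""
--     out = inc if bits[0] else ""
--     for b in bits[1:]:
--         out += "SHIFT c\n"
--         if b:
--             out += inc
--     return out
-- ===== Notes on version B (the rewrite author's own statement) =====
-- stated objective: alternative
-- what changed: The general case precomputes the bit list (LSB-first, then reversed) and emits instructions in one forward MSB-to-LSB pass with string appends, instead of A's halve-and-prepend string building; the power-of-two branch replaces A's two loops (log computation plus a second halve-and-prepend loop) by int.bit_length minus one fed to the same forward emitter.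
import Mathlib
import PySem

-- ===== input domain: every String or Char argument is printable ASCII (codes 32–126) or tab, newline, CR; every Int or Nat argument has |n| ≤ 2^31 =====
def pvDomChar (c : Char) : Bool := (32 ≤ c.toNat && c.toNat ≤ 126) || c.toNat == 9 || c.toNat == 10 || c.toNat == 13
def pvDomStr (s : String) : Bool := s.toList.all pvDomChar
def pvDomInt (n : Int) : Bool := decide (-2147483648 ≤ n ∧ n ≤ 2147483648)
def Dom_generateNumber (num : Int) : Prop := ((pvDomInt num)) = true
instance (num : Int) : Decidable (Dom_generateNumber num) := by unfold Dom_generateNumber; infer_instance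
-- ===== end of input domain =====

-- B replaces A's halve-and-prepend string building by precomputed bits plus one
-- forward MSB-to-LSB emit pass (and int.bit_length minus one instead of A's log loop); alternative decomposition, same cost.

-- ===== PORT A =====

-- Python's `n * s` for a string s and n : Int (n repetitions, empty for n ≤ 0); exact on this use
def pyStrMul (n : Int) (s : String) : String :=
  if n ≤ 0 then "" else pyStrMul (n - 1) s ++ s
termination_by n.toNat
decreasing_by omega

-- A's `while num > 0` halve-and-prepend loop (used with inc = "INC a\n" in the power branch, inc_dec in general)
def buildLinesA (num : Int) (lines : String) (inc : String) : String :=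
  if num > 0 then
    if PySem.Int.mod num 2 = 0 then
      buildLinesA (PySem.Int.floordiv num 2) ("SHIFT c\n" ++ lines) inc
    else
      buildLinesA (num - 1) (inc ++ lines) inc
  else lines
termination_by num.toNat
decreasing_by
  · rw [PySem.Int.floordiv_eq_ediv_of_pos (by norm_num)]; omega
  · omega

-- A's `while num >= 2: log_num += 1; num //= 2` loop
def logLoopA (num : Int) (log_num : Int) : Int :=
  if num ≥ 2 then logLoopA (PySem.Int.floordiv num 2) (log_num + 1) else log_num
termination_by num.toNat
decreasing_by rw [PySem.Int.floordiv_eq_ediv_of_pos (by norm_num)]; omega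

def generateNumber (num0 : Int) : String :=
  let p := if num0 < 0 then (-num0, "DEC a\n") else (num0, "INC a\n")
  let num := p.1
  let inc_dec := p.2
  if num ≤ 7 then
    "RESET a\n" ++ pyStrMul num inc_dec
  else if num ≥ 256 ∧ PySem.Int.band num (num - 1) = 0 then
    let log_num := logLoopA num 0
    let lines := buildLinesA log_num "" "INC a\n"
    "RESET a\n" ++ "RESET c\n" ++ "INC c\n" ++ lines ++ "SWAP c\n" ++ "RESET a\n" ++ inc_dec ++ "SHIFT c\n"
  else
    "RESET a\n" ++ "RESET c\n" ++ "INC c\n" ++ buildLinesA num "" inc_dec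

-- ===== PORT B =====

-- Source B's bit-collecting loop: appends (n % 2 == 1) and halves, LSB first
def bitsRevB (n : Int) (bits : List Bool) : List Bool :=
  if n > 0 then
    bitsRevB (PySem.Int.floordiv n 2) (bits ++ [decide (PySem.Int.mod n 2 = 1)])
  else bits
termination_by n.toNat
decreasing_by rw [PySem.Int.floordiv_eq_ediv_of_pos (by norm_num)]; omega

-- Source B's forward emit pass over the reversed bit list
def emitB (bits : List Bool) (inc : String) : String :=
  match bits with
  | [] => ""
  | b :: rest =>
    rest.foldl (fun out c => if c then (out ++ "SHIFT c\n") ++ inc else out ++ "SHIFT c\n")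
      (if b then inc else "")

def forwardB (n : Int) (inc : String) : String :=
  emitB (bitsRevB n []).reverse inc

def generateNumber_alt (num0 : Int) : String :=
  let p := if num0 < 0 then (-num0, "DEC a\n") else (num0, "INC a\n")
  let num := p.1
  let inc_dec := p.2
  if num ≤ 7 then
    "RESET a\n" ++ pyStrMul num inc_dec
  else if num ≥ 256 ∧ PySem.Int.band num (num - 1) = 0 then
    "RESET a\n" ++ "RESET c\n" ++ "INC c\n" ++
      forwardB ((PySem.Int.bitLength num : Int) - 1) "INC a\n" ++
      "SWAP c\n" ++ "RESET a\n" ++ inc_dec ++ "SHIFT c\n"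
  else
    "RESET a\n" ++ "RESET c\n" ++ "INC c\n" ++ forwardB num inc_dec

-- ===== PRECONDITION & SPEC =====
def Spec_generateNumber (num : Int) (out : String) : Prop := out = generateNumber_alt num
instance (num : Int) (out : String) : Decidable (Spec_generateNumber num out) := by unfold Spec_generateNumber; infer_instance

-- ===== CLAIM (what is proved, stated in full; the proofs are below) =====
def Claim_equal_generateNumber : Prop := ∀ (num : Int), Dom_generateNumber num → Spec_generateNumber num (generateNumber num)

-- ===== LEMMAS AND PROOFS =====

-- common reference shape: the instruction string for synthesizing m (MSB-first binary method)
def refR (m : Nat) (inc : String) : String :=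
  if m = 0 then ""
  else if m % 2 = 0 then refR (m / 2) inc ++ "SHIFT c\n"
  else refR (m - 1) inc ++ inc
termination_by m
decreasing_by all_goals omega

-- LSB-first bit list of m
def lsb (m : Nat) : List Bool :=
  if m = 0 then [] else decide (m % 2 = 1) :: lsb (m / 2)
termination_by m
decreasing_by omega

lemma buildLinesA_eq (k : Nat) : ∀ (n : Int) (lines inc : String), n.toNat = k →
    buildLinesA n lines inc = refR n.toNat inc ++ lines := by
  induction k using Nat.strong_induction_on with
  | _ k ih =>
    intro n lines inc hk
    rw [buildLinesA]
    by_cases hpos : n > 0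
    · simp only [hpos, if_true]
      rw [PySem.Int.mod_eq_emod_of_pos (by norm_num : (0:Int) < 2)]
      by_cases hm : n % 2 = 0
      · simp only [hm, if_true]
        rw [PySem.Int.floordiv_eq_ediv_of_pos (by norm_num)]
        rw [ih (n / 2).toNat (by omega) (n / 2) _ inc rfl]
        rw [show (n / 2).toNat = n.toNat / 2 by omega]
        conv_rhs => rw [refR]
        have h0 : n.toNat ≠ 0 := by omega
        have h2 : n.toNat % 2 = 0 := by omega
        simp [h0, h2, String.append_assoc]
      · simp only [hm, if_false]
        rw [ih (n - 1).toNat (by omega) (n - 1) _ inc rfl]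
        rw [show (n - 1).toNat = n.toNat - 1 by omega]
        conv_rhs => rw [refR]
        have h0 : n.toNat ≠ 0 := by omega
        have h2 : ¬ (n.toNat % 2 = 0) := by omega
        simp [h0, h2, String.append_assoc]
    · simp only [hpos, if_false]
      rw [show n.toNat = 0 by omega, refR]
      simp

lemma bitsRevB_eq (k : Nat) : ∀ (n : Int) (bits : List Bool), n.toNat = k →
    bitsRevB n bits = bits ++ lsb n.toNat := by
  induction k using Nat.strong_induction_on with
  | _ k ih =>
    intro n bits hk
    rw [bitsRevB]
    by_cases hpos : n > 0
    · simp only [hpos, if_true]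
      rw [PySem.Int.floordiv_eq_ediv_of_pos (by norm_num),
          PySem.Int.mod_eq_emod_of_pos (by norm_num)]
      rw [ih (n / 2).toNat (by omega) (n / 2) _ rfl]
      rw [show (n / 2).toNat = n.toNat / 2 by omega]
      conv_rhs => rw [lsb]
      have h0 : n.toNat ≠ 0 := by omega
      have hmod : (n % 2 = 1) = (n.toNat % 2 = 1) := by
        apply propext; omega
      simp [h0, hmod, List.append_assoc]
    · simp only [hpos, if_false]
      rw [show n.toNat = 0 by omega, lsb]
      simp

lemma lsb_ne_nil (m : Nat) (h : m ≠ 0) : lsb m ≠ [] := by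
  rw [lsb]; simp [h]

lemma emitB_append (l : List Bool) (b : Bool) (inc : String) (h : l ≠ []) :
    emitB (l ++ [b]) inc
      = (if b then (emitB l inc ++ "SHIFT c\n") ++ inc else emitB l inc ++ "SHIFT c\n") := by
  match l with
  | x :: xs =>
    simp only [emitB, List.cons_append, List.foldl_append, List.foldl_cons, List.foldl_nil]

lemma emitB_rev_lsb (k : Nat) : ∀ (m : Nat) (inc : String), m = k →
    emitB (lsb m).reverse inc = refR m inc := by
  induction k using Nat.strong_induction_on with
  | _ k ih =>
    intro m inc hm
    subst hm
    by_cases h0 : m = 0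
    · rw [h0, lsb, refR]; simp [emitB]
    · rw [lsb]
      simp only [h0, if_false, List.reverse_cons]
      by_cases h1 : m / 2 = 0
      · have hm1 : m = 1 := by omega
        subst hm1
        simp [lsb, emitB, refR]
      · rw [emitB_append _ _ _ (by simp [lsb_ne_nil _ h1])]
        rw [ih (m / 2) (by omega) (m / 2) inc rfl]
        by_cases he : m % 2 = 0
        · have hb : (decide (m % 2 = 1)) = false := by simp [he]
          rw [hb]
          conv_rhs => rw [refR]
          simp [h0, he]
        · have hb : (decide (m % 2 = 1)) = true := by simp; omega
          rw [hb]
          conv_rhs => rw [refR]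
          have hm1 : ¬ (m % 2 = 0) := he
          simp only [h0, if_false, hm1, if_true, if_false]
          -- refR m = refR (m-1) ++ inc, refR (m-1) = refR ((m-1)/2) ++ "SHIFT c\n", (m-1)/2 = m/2
          have hm2 : m - 1 ≠ 0 := by omega
          have hme : (m - 1) % 2 = 0 := by omega
          conv_rhs => rw [refR]
          simp only [hm2, if_false, hme, if_true]
          rw [show (m - 1) / 2 = m / 2 by omega]
  -- (no more goals)

lemma forwardB_eq (n : Int) (inc : String) : forwardB n inc = refR n.toNat inc := by
  rw [forwardB, bitsRevB_eq n.toNat n [] rfl]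
  simp only [List.nil_append]
  exact emitB_rev_lsb n.toNat n.toNat inc rfl

lemma buildLinesA_eq' (n : Int) (inc : String) :
    buildLinesA n "" inc = forwardB n inc := by
  rw [buildLinesA_eq n.toNat n "" inc rfl, forwardB_eq]
  exact String.append_empty

lemma logLoopA_eq (k : Nat) : ∀ (n : Int) (l : Int), n.toNat = k → 1 ≤ n →
    logLoopA n l = l + (Nat.log2 n.toNat : Int) := by
  induction k using Nat.strong_induction_on with
  | _ k ih =>
    intro n l hk h1
    rw [logLoopA]
    by_cases h2 : n ≥ 2
    · simp only [h2, if_true]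
      rw [PySem.Int.floordiv_eq_ediv_of_pos (by norm_num)]
      rw [ih (n / 2).toNat (by omega) (n / 2) (l + 1) rfl (by omega)]
      rw [show (n / 2).toNat = n.toNat / 2 by omega]
      conv_rhs => rw [Nat.log2_def]
      have h2' : 2 ≤ n.toNat := by omega
      simp only [h2', if_true]
      push_cast
      ring
    · simp only [h2, if_false]
      rw [show n.toNat = 1 by omega]
      simp [Nat.log2_def]

lemma bitLength_eq_log2 (k : Nat) : ∀ (m : Nat), m = k → 0 < m →
    PySem.Int.bitLength (m : Int) = Nat.log2 m + 1 := by
  induction k using Nat.strong_induction_on with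
  | _ k ih =>
    intro m hk h1
    subst hk
    rw [PySem.Int.bitLength_natCast h1]
    by_cases h2 : 2 ≤ m
    · rw [ih (m / 2) (by omega) (m / 2) rfl (by omega)]
      conv_rhs => rw [Nat.log2_def]
      simp [h2]
    · have hm1 : m = 1 := by omega
      subst hm1
      decide

-- the two ports agree branch by branch
lemma main_eq (num : Int) : generateNumber num = generateNumber_alt num := by
  rw [generateNumber, generateNumber_alt]
  set p := if num < 0 then (-num, "DEC a\n") else (num, "INC a\n") with hp
  have hnn : 0 ≤ p.1 := by
    rw [hp]; split <;> simp <;> omega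
  by_cases h7 : p.1 ≤ 7
  · rw [if_pos h7, if_pos h7]
  · rw [if_neg h7, if_neg h7]
    by_cases hbig : p.1 ≥ 256 ∧ PySem.Int.band p.1 (p.1 - 1) = 0
    · rw [if_pos hbig, if_pos hbig]
      have hlog : logLoopA p.1 0 = (Nat.log2 p.1.toNat : Int) := by
        rw [logLoopA_eq p.1.toNat p.1 0 rfl (by omega)]; ring
      have hbl : PySem.Int.bitLength p.1 = Nat.log2 p.1.toNat + 1 := by
        have := bitLength_eq_log2 p.1.toNat p.1.toNat rfl (by omega)
        rwa [Int.toNat_of_nonneg hnn] at this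
      simp only [hlog, hbl]
      rw [buildLinesA_eq']
      rw [show ((((Nat.log2 p.1.toNat + 1 : Nat) : Int)) - 1) = ((Nat.log2 p.1.toNat : Nat) : Int) by push_cast; ring]
    · rw [if_neg hbig, if_neg hbig, buildLinesA_eq']

-- ===== VERDICT (by name: the statement is the Claim_ definition above) =====
theorem generateNumber_spec : Claim_equal_generateNumber := by
  intro num _
  unfold Spec_generateNumber
  exact main_eq num
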